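-- pv_equiv track=rewrite | github.com/shsym/pie | pie/src/pie_backend/worker.py | calculate_topology
-- ===== SOURCE A (Python) =====
-- def calculate_topology(world_size: int, tp_degree: int) -> list[list[int]]:
--     """Calculate process group topology from world size and TP degree.
--
--     Args:
--         world_size: Total number of worker processes
--         tp_degree: Tensor parallel degree (GPUs per model replica)
--
--     Returns:
--         List of groups, each a list of ranks.
--         Example: world_size=4, tp=2 → [[0, 1], [2, 3]]
--
--     Raises:
--         ValueError: If world_size is not divisible by tp_degree
--     """
--     if world_size % tp_degree != 0:
--         raise ValueError(
--             f"World size ({world_size}) must be divisible by TP degree ({tp_degree})"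
--         )
--
--     num_groups = world_size // tp_degree
--     return [
--         list(range(g * tp_degree, (g + 1) * tp_degree))
--         for g in range(num_groups)
--     ]
-- ===== SOURCE B (Python) =====
-- def calculate_topology(world_size: int, tp_degree: int) -> list[list[int]]:
--     """Partition ranks into consecutive TP groups via one flat pass."""
--     if world_size % tp_degree != 0:
--         raise ValueError(
--             f"World size ({world_size}) must be divisible by TP degree ({tp_degree})"
--         )
--     groups = []
--     current = []
--     for r in range(world_size):
--         current.append(r)
--         if len(current) == tp_degree:
--             groups.append(current)
--             current = []
--     return groups
-- ===== Notes on version B (the rewrite author's own statement) =====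
-- stated objective: alternative
-- what changed: Replaces the num_groups/range-arithmetic comprehension by a single flat accumulator pass over range(world_size) that buffers ranks and flushes a group whenever the buffer reaches tp_degree.
-- intended difference: For negative world_size with negative tp_degree (divisible), A returns ws//tp copies of the empty list, an artifact of its range arithmetic, while B returns [], the intended empty topology since there are no ranks. — e.g. on calculate_topology(-2, -2): A returns [[]], B returns []
import Mathlib
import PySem

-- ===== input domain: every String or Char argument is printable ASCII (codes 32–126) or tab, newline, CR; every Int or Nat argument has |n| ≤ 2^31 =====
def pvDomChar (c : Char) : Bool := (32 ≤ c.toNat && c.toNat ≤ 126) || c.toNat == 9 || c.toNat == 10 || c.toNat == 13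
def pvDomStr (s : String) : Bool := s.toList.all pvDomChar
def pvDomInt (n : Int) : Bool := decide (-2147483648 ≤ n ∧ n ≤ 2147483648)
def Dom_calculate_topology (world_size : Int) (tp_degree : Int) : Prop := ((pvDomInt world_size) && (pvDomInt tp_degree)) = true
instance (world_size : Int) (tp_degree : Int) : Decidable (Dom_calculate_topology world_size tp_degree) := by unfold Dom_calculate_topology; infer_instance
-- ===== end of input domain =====

-- B replaces A's num_groups/range-arithmetic comprehension by one flat buffered pass over range(world_size); same cost, different decomposition.


-- ===== PORT A =====
-- literal port of A; the ValueError / ZeroDivisionError inputs are excluded by Pre_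
def calculate_topology (world_size : Int) (tp_degree : Int) : List (List Int) :=
  let num_groups := PySem.Int.floordiv world_size tp_degree
  (PySem.List.pyRange 0 num_groups 1).map
    (fun g => PySem.List.pyRange (g * tp_degree) ((g + 1) * tp_degree) 1)

-- ===== PORT B =====
-- one flat pass: buffer ranks in `current`, flush to `groups` when the buffer reaches tp_degree
def calculate_topology_alt (world_size : Int) (tp_degree : Int) : List (List Int) :=
  let st := (PySem.List.pyRange 0 world_size 1).foldl
    (fun (st : List (List Int) × List Int) r =>
      let current := st.2 ++ [r]
      if (current.length : Int) = tp_degree then (st.1 ++ [current], []) else (st.1, current))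
    ([], [])
  st.1

-- ===== PRECONDITION & SPEC =====
-- Pre_ is A's own guard: tp_degree ≠ 0 (ZeroDivisionError) and world_size % tp_degree == 0 (else ValueError)
def Pre_calculate_topology (world_size : Int) (tp_degree : Int) : Prop :=
  tp_degree ≠ 0 ∧ PySem.Int.mod world_size tp_degree = 0
instance (world_size : Int) (tp_degree : Int) : Decidable (Pre_calculate_topology world_size tp_degree) := by unfold Pre_calculate_topology; infer_instance
def pvWitness_calculate_topology : Int × Int := (4, 2)

-- For negative world_size with negative tp_degree (divisible), A returns ws//tp copies of the
-- empty list — an artifact of its range arithmetic — while B returns [], the intended empty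
-- topology since there are no ranks.
def D_calculate_topology (world_size : Int) (tp_degree : Int) : Prop :=
  world_size < 0 ∧ tp_degree < 0
instance (world_size : Int) (tp_degree : Int) : Decidable (D_calculate_topology world_size tp_degree) := by unfold D_calculate_topology; infer_instance

def Spec_calculate_topology (world_size : Int) (tp_degree : Int) (out : List (List Int)) : Prop :=
  ¬ D_calculate_topology world_size tp_degree → out = calculate_topology_alt world_size tp_degree
instance (world_size : Int) (tp_degree : Int) (out : List (List Int)) : Decidable (Spec_calculate_topology world_size tp_degree out) := by unfold Spec_calculate_topology; infer_instance

def pvDiffWitness_calculate_topology : Int × Int := (-2, -2)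
def pvDiffWitnessOut_calculate_topology : (List (List Int)) × (List (List Int)) := ([[]], [])

-- ===== CLAIM =====
def Claim_unchanged_calculate_topology : Prop := ∀ (world_size : Int) (tp_degree : Int), Dom_calculate_topology world_size tp_degree → Pre_calculate_topology world_size tp_degree → Spec_calculate_topology world_size tp_degree (calculate_topology world_size tp_degree)
def Claim_changed_calculate_topology : Prop := Dom_calculate_topology (pvDiffWitness_calculate_topology.1) (pvDiffWitness_calculate_topology.2) ∧ Pre_calculate_topology (pvDiffWitness_calculate_topology.1) (pvDiffWitness_calculate_topology.2) ∧ D_calculate_topology (pvDiffWitness_calculate_topology.1) (pvDiffWitness_calculate_topology.2) ∧ calculate_topology (pvDiffWitness_calculate_topology.1) (pvDiffWitness_calculate_topology.2) = pvDiffWitnessOut_calculate_topology.1 ∧ calculate_topology_alt (pvDiffWitness_calculate_topology.1) (pvDiffWitness_calculate_topology.2) = pvDiffWitnessOut_calculate_topology.2 ∧ pvDiffWitnessOut_calculate_topology.1 ≠ pvDiffWitnessOut_calculate_topology.2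
def Claim_exact_calculate_topology : Prop := ∀ (world_size : Int) (tp_degree : Int), Dom_calculate_topology world_size tp_degree → Pre_calculate_topology world_size tp_degree → D_calculate_topology world_size tp_degree → calculate_topology world_size tp_degree ≠ calculate_topology_alt world_size tp_degree

-- ===== LEMMAS AND PROOFS =====

-- B's loop body, named for the lemmas
def pvStep (tp : Int) (st : List (List Int) × List Int) (r : Int) : List (List Int) × List Int :=
  let current := st.2 ++ [r]
  if (current.length : Int) = tp then (st.1 ++ [current], []) else (st.1, current)

theorem alt_eq_foldl (ws tp : Int) :
    calculate_topology_alt ws tp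
      = ((PySem.List.pyRange 0 ws 1).foldl (pvStep tp) ([], [])).1 := by
  rfl

-- with tp ≤ 0 the buffer is never flushed: groups stays fixed
theorem foldl_step_nonpos (tp : Int) (_htp : tp ≤ 0) :
    ∀ (l : List Int) (G : List (List Int)) (cur : List Int),
      (l.foldl (pvStep tp) (G, cur)).1 = G := by
  intro l
  induction l with
  | nil => intro G cur; rfl
  | cons r t ih =>
      intro G cur
      simp only [List.foldl_cons, pvStep]
      rw [if_neg (by simp; omega)]
      exact ih G (cur ++ [r])

-- one full block: starting with buffer pyRange a c 1, consuming pyRange c (a+tp) 1 flushes exactly once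
theorem foldl_one_block (tp : Int) (_htp : 0 < tp) (a : Int) :
    ∀ (c : Int), a ≤ c → c < a + tp →
      ∀ (G : List (List Int)),
        ((PySem.List.pyRange c (a + tp) 1).foldl (pvStep tp) (G, PySem.List.pyRange a c 1))
          = (G ++ [PySem.List.pyRange a (a + tp) 1], []) := by
  intro c
  generalize hk : (a + tp - c).toNat = k
  induction k generalizing c with
  | zero => intro h1 h2; omega
  | succ n ih =>
      intro h1 h2 G
      rw [PySem.List.pyRange_one_cons h2, List.foldl_cons]
      have hbuf : PySem.List.pyRange a c 1 ++ [c] = PySem.List.pyRange a (c + 1) 1 := by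
        rw [PySem.List.pyRange_one_succ_right h1]
      by_cases hfull : c + 1 = a + tp
      · have : ((PySem.List.pyRange a c 1 ++ [c]).length : Int) = tp := by
          rw [hbuf]
          simp [PySem.List.length_pyRange_one]
          omega
        rw [hbuf, hfull] at this
        have hstep : pvStep tp (G, PySem.List.pyRange a c 1) c
            = (G ++ [PySem.List.pyRange a (a + tp) 1], []) := by
          simp only [pvStep, hbuf, hfull]
          rw [if_pos this]
        rw [hstep, hfull, PySem.List.pyRange_one_eq_nil (le_refl (a + tp)), List.foldl_nil]
      · have hlen : ((PySem.List.pyRange a c 1 ++ [c]).length : Int) ≠ tp := by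
          rw [hbuf]
          simp [PySem.List.length_pyRange_one]
          omega
        simp only [pvStep, if_neg hlen]
        rw [hbuf]
        exact ih (c + 1) (by omega) (by omega) (by omega) G

-- k consecutive blocks starting at 0
theorem foldl_blocks (tp : Int) (htp : 0 < tp) :
    ∀ (k : Nat) (a : Int) (G : List (List Int)),
      ((PySem.List.pyRange a (a + k * tp) 1).foldl (pvStep tp) (G, []))
        = (G ++ (List.range k).map
            (fun g : Nat => PySem.List.pyRange (a + (g : Int) * tp) (a + ((g : Int) + 1) * tp) 1), []) := by
  intro k
  induction k with
  | zero =>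
      intro a G
      rw [show a + ((0 : Nat) : Int) * tp = a by push_cast; ring,
          PySem.List.pyRange_one_eq_nil (le_refl a)]
      simp
  | succ n ih =>
      intro a G
      rw [PySem.List.pyRange_one_append a (a + tp) (a + (n + 1 : Nat) * tp)
            (by omega) (by push_cast; nlinarith),
          List.foldl_append]
      have h0 : PySem.List.pyRange a a 1 = [] := PySem.List.pyRange_one_eq_nil (le_refl _)
      have hblk := foldl_one_block tp htp a a (le_refl _) (by omega) G
      rw [h0] at hblk
      rw [hblk]
      have : a + (n + 1 : Nat) * tp = (a + tp) + n * tp := by push_cast; ring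
      have h00 : a + (((0 : Nat) : Int)) * tp = a := by push_cast; ring
      have h01 : a + ((((0 : Nat) : Int)) + 1) * tp = a + tp := by push_cast; ring
      have hfun : ((fun g : Nat => PySem.List.pyRange (a + (g : Int) * tp) (a + ((g : Int) + 1) * tp) 1) ∘ Nat.succ)
          = fun g : Nat => PySem.List.pyRange ((a + tp) + (g : Int) * tp) ((a + tp) + ((g : Int) + 1) * tp) 1 := by
        funext g
        simp only [Function.comp_apply]
        have e1 : a + ((g.succ : Nat) : Int) * tp = (a + tp) + (g : Int) * tp := by push_cast; ring
        have e2 : a + (((g.succ : Nat) : Int) + 1) * tp = (a + tp) + ((g : Int) + 1) * tp := by push_cast; ring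
        rw [e1, e2]
      rw [this, ih (a + tp) (G ++ [PySem.List.pyRange a (a + tp) 1]),
          List.range_succ_eq_map, List.map_cons, List.map_map, List.append_assoc,
          List.singleton_append, h00, h01, hfun]

theorem calculate_topology_spec : Claim_unchanged_calculate_topology := by
  intro ws tp _ hpre hnd
  obtain ⟨htp0, hmod⟩ := hpre
  have hdvd : tp ∣ ws := (PySem.Int.mod_eq_zero_iff_dvd ws tp).mp hmod
  obtain ⟨q, hq⟩ := hdvd
  rw [mul_comm] at hq
  rcases lt_trichotomy tp 0 with htp | htp | htp
  · -- tp < 0, and ¬D_ forces 0 ≤ ws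
    have hws : 0 ≤ ws := by
      by_contra h
      exact hnd ⟨by omega, htp⟩
    -- A: num_groups ≤ 0 when ws > 0 (q < 0), and = 0 when ws = 0
    have hfd : PySem.Int.floordiv ws tp = q := by
      have h := PySem.Int.floordiv_mul_add_mod ws tp
      rw [hmod, add_zero] at h
      exact mul_right_cancel₀ (by omega) (by rw [h, hq])
    have hqle : q ≤ 0 := by nlinarith
    simp only [calculate_topology]
    rw [alt_eq_foldl, foldl_step_nonpos tp (by omega), hfd,
        PySem.List.pyRange_one_eq_nil (by omega), List.map_nil]
  · omega
  · -- tp > 0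
    have hfd : PySem.Int.floordiv ws tp = q := by
      have h := PySem.Int.floordiv_mul_add_mod ws tp
      rw [hmod, add_zero] at h
      exact mul_right_cancel₀ (by omega) (by rw [h, hq])
    by_cases hq0 : 0 ≤ q
    · -- ws = q*tp ≥ 0: k = q.toNat blocks
      have hws' : ws = 0 + (q.toNat : Int) * tp := by
        rw [Int.toNat_of_nonneg hq0]; omega
      simp only [calculate_topology]
      rw [hfd, alt_eq_foldl, hws', foldl_blocks tp htp q.toNat 0 []]
      simp only [List.nil_append]
      rw [PySem.List.pyRange_zero, List.map_map]
      apply List.map_congr_left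
      intro g _
      simp only [Function.comp_apply]
      simp
    · -- ws = q*tp < 0 (since tp > 0, q < 0): both sides []
      have hwsneg : ws < 0 := by nlinarith
      simp only [calculate_topology]
      rw [hfd, PySem.List.pyRange_one_eq_nil (by omega), List.map_nil,
          alt_eq_foldl, PySem.List.pyRange_one_eq_nil (by omega), List.foldl_nil]

theorem calculate_topology_changed : Claim_changed_calculate_topology := by
  unfold Claim_changed_calculate_topology; decide

theorem calculate_topology_tight : Claim_exact_calculate_topology := by
  intro ws tp _ hpre hd
  obtain ⟨htp0, hmod⟩ := hpre
  obtain ⟨hws, htp⟩ := hd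
  obtain ⟨q, hq⟩ := (PySem.Int.mod_eq_zero_iff_dvd ws tp).mp hmod
  rw [mul_comm] at hq
  have hfd : PySem.Int.floordiv ws tp = q := by
    have h := PySem.Int.floordiv_mul_add_mod ws tp
    rw [hmod, add_zero] at h
    exact mul_right_cancel₀ (by omega) (by rw [h, hq])
  have hqpos : 0 < q := by nlinarith
  rw [alt_eq_foldl, foldl_step_nonpos tp (by omega)]
  simp only [calculate_topology]
  rw [hfd, PySem.List.pyRange_one_cons hqpos, List.map_cons]
  simp

-- ===== VERDICT =====
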